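-- pv_equiv track=rewrite | github.com/Naareman/splita | src/splita/core/interleaving.py | _balanced_interleave
-- ===== SOURCE A (Python) =====
-- def _balanced_interleave(ranking_a: list, ranking_b: list) -> tuple[list, list[int]]:
--     """Balanced interleaving: merge by rank, credit both if tied.
--
--     Items at the same rank get priority based on their rank in each list.
--     """
--     interleaved: list = []
--     teams: list[int] = []
--     seen: set = set()
--
--     rank_a = {item: i for i, item in enumerate(ranking_a)}
--     rank_b = {item: i for i, item in enumerate(ranking_b)}
--     all_items = list(dict.fromkeys(ranking_a + ranking_b))
--
--     # Sort by minimum rank in either list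
--     def sort_key(item: object) -> float:
--         ra = rank_a.get(item, float("inf"))
--         rb = rank_b.get(item, float("inf"))
--         return min(ra, rb)
--
--     all_items.sort(key=sort_key)
--
--     for item in all_items:
--         if item in seen:
--             continue
--         seen.add(item)
--         interleaved.append(item)
--         ra = rank_a.get(item, float("inf"))
--         rb = rank_b.get(item, float("inf"))
--         if ra <= rb:
--             teams.append(0)  # team A
--         else:
--             teams.append(1)  # team B
--
--     return interleaved, teams
-- ===== SOURCE B (Python) =====
-- def _balanced_interleave(ranking_a: list, ranking_b: list) -> tuple[list, list[int]]:
--     """Bucket (counting) merge: no comparison sort, no seen-set.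
--
--     Every item of either ranking has a finite minimum rank < max(len_a, len_b),
--     so a single pass drops each (item, team) pair into the bucket of its min
--     rank; concatenating buckets in order reproduces the stable sort by min rank.
--     """
--     rank_a = {item: i for i, item in enumerate(ranking_a)}
--     rank_b = {item: i for i, item in enumerate(ranking_b)}
--     n = max(len(ranking_a), len(ranking_b))
--     buckets: list = [[] for _ in range(n)]
--     for item in dict.fromkeys(ranking_a + ranking_b):
--         ra = rank_a.get(item)
--         rb = rank_b.get(item)
--         if rb is None or (ra is not None and ra <= rb):
--             buckets[ra].append((item, 0))
--         else:
--             buckets[rb].append((item, 1))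
--     interleaved: list = []
--     teams: list = []
--     for bucket in buckets:
--         for item, team in bucket:
--             interleaved.append(item)
--             teams.append(team)
--     return interleaved, teams
-- ===== Notes on version B (the rewrite author's own statement) =====
-- stated objective: faster
-- what changed: Replaces A's key-function comparison sort plus a redundant seen-set output loop with a single-pass bucket (counting) merge: every item's min rank is a finite int below max(len_a, len_b), so each (item, team) pair is dropped into the bucket of its min rank and the buckets are concatenated in order, reproducing the stable sort.
import Mathlib
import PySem

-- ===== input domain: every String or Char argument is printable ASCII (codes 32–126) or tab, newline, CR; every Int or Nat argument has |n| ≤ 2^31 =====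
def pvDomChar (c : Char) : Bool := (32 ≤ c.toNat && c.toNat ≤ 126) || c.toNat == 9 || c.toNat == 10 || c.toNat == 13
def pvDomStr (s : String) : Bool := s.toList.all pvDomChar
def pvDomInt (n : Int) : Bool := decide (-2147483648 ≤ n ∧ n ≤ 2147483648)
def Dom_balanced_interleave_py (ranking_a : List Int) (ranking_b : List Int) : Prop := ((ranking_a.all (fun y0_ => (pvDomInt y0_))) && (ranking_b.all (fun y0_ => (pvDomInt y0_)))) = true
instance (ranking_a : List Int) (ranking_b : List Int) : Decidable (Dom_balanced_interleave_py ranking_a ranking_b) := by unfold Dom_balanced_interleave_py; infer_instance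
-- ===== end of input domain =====

-- B replaces A's comparison sort by min-rank (plus the redundant seen-set pass) with a
-- single-pass bucket (counting) merge over the deduplicated items; same return value.

-- shared helper: the dict comprehension {item: i for i, item in enumerate(l)},
-- written identically in both A and B (last occurrence wins)
def pvRank (l : List Int) : PySem.Dict Int Int :=
  (PySem.List.enumerate l).foldl (fun d p => d.insert p.2 p.1) PySem.Dict.empty

-- ===== PORT A =====
def balanced_interleave_py (ranking_a : List Int) (ranking_b : List Int) : List Int × List Int :=
  let rank_a := pvRank ranking_a
  let rank_b := pvRank ranking_b
  let all_items := PySem.List.dedup (ranking_a ++ ranking_b)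
  -- float("inf") ported as the sentinel len_a + len_b: it is strictly larger than every
  -- stored rank, and every item of all_items occurs in at least one of the two dicts,
  -- so every comparison the Python makes is reproduced exactly.
  let inf : Int := (ranking_a.length : Int) + (ranking_b.length : Int)
  let sort_key : Int → Int := fun item =>
    min ((rank_a.get? item).getD inf) ((rank_b.get? item).getD inf)
  let sorted_items := PySem.List.sorted all_items sort_key false
  let r := sorted_items.foldl
    (fun (st : List Int × List Int × PySem.Set Int) item =>
      if PySem.Set.contains st.2.2 item then st
      else
        (st.1 ++ [item],
         st.2.1 ++ [if (rank_a.get? item).getD inf ≤ (rank_b.get? item).getD inf then (0 : Int) else 1],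
         PySem.Set.add st.2.2 item))
    ([], [], PySem.Set.empty)
  (r.1, r.2.1)

-- ===== PORT B =====
def balanced_interleave_py_alt (ranking_a : List Int) (ranking_b : List Int) : List Int × List Int :=
  let rank_a := pvRank ranking_a
  let rank_b := pvRank ranking_b
  let n := max ranking_a.length ranking_b.length
  let buckets := (PySem.List.dedup (ranking_a ++ ranking_b)).foldl
    (fun bs item =>
      match rank_a.get? item, rank_b.get? item with
      | ra, none =>
          -- rb is None ⇒ ra is present for every item drawn from the two lists (.getD 0 unreachable)
          PySem.List.pySetD bs (ra.getD 0) (PySem.List.pyGetD bs (ra.getD 0) [] ++ [(item, (0 : Int))])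
      | some ra, some rb =>
          if ra ≤ rb then
            PySem.List.pySetD bs ra (PySem.List.pyGetD bs ra [] ++ [(item, (0 : Int))])
          else
            PySem.List.pySetD bs rb (PySem.List.pyGetD bs rb [] ++ [(item, (1 : Int))])
      | none, some rb =>
          PySem.List.pySetD bs rb (PySem.List.pyGetD bs rb [] ++ [(item, (1 : Int))]))
    (List.replicate n ([] : List (Int × Int)))
  let pairs := buckets.flatten
  (pairs.map Prod.fst, pairs.map Prod.snd)

-- ===== PRECONDITION & SPEC =====
def Spec_balanced_interleave_py (ranking_a : List Int) (ranking_b : List Int) (out : List Int × List Int) : Prop := out = balanced_interleave_py_alt ranking_a ranking_b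
instance (ranking_a : List Int) (ranking_b : List Int) (out : List Int × List Int) : Decidable (Spec_balanced_interleave_py ranking_a ranking_b out) := by unfold Spec_balanced_interleave_py; infer_instance

-- ===== CLAIM (what is proved, stated in full; the proofs are below) =====
def Claim_equal_balanced_interleave_py : Prop := ∀ (ranking_a : List Int) (ranking_b : List Int), Dom_balanced_interleave_py ranking_a ranking_b → Spec_balanced_interleave_py ranking_a ranking_b (balanced_interleave_py ranking_a ranking_b)

-- ===== LEMMAS AND PROOFS =====

-- proof-side names for A's sort key and team choice (the ports write these inline)
def pvKey (a b : List Int) (item : Int) : Int :=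
  min (((pvRank a).get? item).getD ((a.length : Int) + (b.length : Int)))
      (((pvRank b).get? item).getD ((a.length : Int) + (b.length : Int)))

def pvTeam (a b : List Int) (item : Int) : Int :=
  if ((pvRank a).get? item).getD ((a.length : Int) + (b.length : Int))
      ≤ ((pvRank b).get? item).getD ((a.length : Int) + (b.length : Int)) then 0 else 1

-- dict-comprehension facts
theorem pv_foldl_insert_none (ps : List (Int × Int)) (d : PySem.Dict Int Int) (x : Int) :
    (ps.foldl (fun d p => d.insert p.2 p.1) d).get? x = none ↔
      (d.get? x = none ∧ ∀ p ∈ ps, p.2 ≠ x) := by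
  induction ps generalizing d with
  | nil => simp
  | cons p ps ih =>
    simp only [List.foldl_cons, ih, PySem.Dict.get?_insert, List.mem_cons]
    constructor
    · rintro ⟨h1, h2⟩
      by_cases h : x = p.2
      · rw [if_pos h] at h1; simp at h1
      · rw [if_neg h] at h1
        refine ⟨h1, fun q hq => ?_⟩
        rcases hq with rfl | hq
        · exact fun hc => h hc.symm
        · exact h2 q hq
    · rintro ⟨h1, h2⟩
      refine ⟨?_, fun q hq => h2 q (Or.inr hq)⟩
      rw [if_neg (fun e => h2 p (Or.inl rfl) e.symm)]
      exact h1

theorem pv_foldl_insert_some (ps : List (Int × Int)) (d : PySem.Dict Int Int) (x i : Int) :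
    (ps.foldl (fun d p => d.insert p.2 p.1) d).get? x = some i →
      ((i, x) ∈ ps ∨ d.get? x = some i) := by
  induction ps generalizing d with
  | nil => simp
  | cons p ps ih =>
    intro h
    rcases ih _ h with h' | h'
    · exact Or.inl (List.mem_cons_of_mem _ h')
    · rw [PySem.Dict.get?_insert] at h'
      split_ifs at h' with he
      · cases h'; exact Or.inl (he ▸ List.mem_cons_self)
      · exact Or.inr h'

theorem pvRank_none_iff (l : List Int) (x : Int) :
    (pvRank l).get? x = none ↔ x ∉ l := by
  rw [pvRank, pv_foldl_insert_none]
  simp only [PySem.Dict.get?_empty, true_and]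
  constructor
  · intro h hx
    obtain ⟨k, hk, he⟩ := List.getElem_of_mem hx
    exact h ((0 : Int) + k, x) (by rw [PySem.List.mem_enumerate_iff]; exact ⟨k, hk, by simp [he]⟩) rfl
  · intro h p hp
    rw [PySem.List.mem_enumerate_iff] at hp
    obtain ⟨k, hk, rfl⟩ := hp
    exact fun e => h (e ▸ List.getElem_mem hk)

theorem pvRank_some_bound (l : List Int) (x i : Int)
    (h : (pvRank l).get? x = some i) : 0 ≤ i ∧ i < (l.length : Int) := by
  rcases pv_foldl_insert_some _ _ _ _ h with h' | h'
  · rw [PySem.List.mem_enumerate_iff] at h'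
    obtain ⟨k, hk, he⟩ := h'
    have : i = (0 : Int) + k := congrArg Prod.fst he
    omega
  · simp [PySem.Dict.get?_empty] at h'

theorem pvKey_bound (a b : List Int) (x : Int) (hx : x ∈ a ++ b) :
    0 ≤ pvKey a b x ∧ pvKey a b x < ((max a.length b.length : Nat) : Int) := by
  rw [pvKey]
  rcases ha : (pvRank a).get? x with _ | ra <;> rcases hb : (pvRank b).get? x with _ | rb
  · rw [pvRank_none_iff] at ha hb
    simp at hx; tauto
  · have := pvRank_some_bound b x rb hb
    simp only [Option.getD_some, Option.getD_none]
    constructor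
    · omega
    · rw [min_eq_right (by omega)]; push_cast; omega
  · have := pvRank_some_bound a x ra ha
    simp only [Option.getD_some, Option.getD_none]
    constructor
    · omega
    · rw [min_eq_left (by omega)]; push_cast; omega
  · have h1 := pvRank_some_bound a x ra ha
    have h2 := pvRank_some_bound b x rb hb
    simp only [Option.getD_some]
    rcases le_total ra rb with h | h
    · rw [min_eq_left h]; push_cast; omega
    · rw [min_eq_right h]; push_cast; omega

-- B's match-step equals the normalized bucket step for items of the two lists
theorem pv_step_eq (a b : List Int) (x : Int) (bs : List (List (Int × Int))) (hx : x ∈ a ++ b) :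
    (match (pvRank a).get? x, (pvRank b).get? x with
      | ra, none =>
          PySem.List.pySetD bs (ra.getD 0) (PySem.List.pyGetD bs (ra.getD 0) [] ++ [(x, (0 : Int))])
      | some ra, some rb =>
          if ra ≤ rb then
            PySem.List.pySetD bs ra (PySem.List.pyGetD bs ra [] ++ [(x, (0 : Int))])
          else
            PySem.List.pySetD bs rb (PySem.List.pyGetD bs rb [] ++ [(x, (1 : Int))])
      | none, some rb =>
          PySem.List.pySetD bs rb (PySem.List.pyGetD bs rb [] ++ [(x, (1 : Int))]))
      = PySem.List.pySetD bs (pvKey a b x)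
          (PySem.List.pyGetD bs (pvKey a b x) [] ++ [(x, pvTeam a b x)]) := by
  rw [pvKey, pvTeam]
  rcases ha : (pvRank a).get? x with _ | ra <;> rcases hb : (pvRank b).get? x with _ | rb
  · rw [pvRank_none_iff] at ha hb
    simp at hx; tauto
  · have h2 := pvRank_some_bound b x rb hb
    have hmin : min ((a.length : Int) + b.length) rb = rb := min_eq_right (by omega)
    have hle : ¬ ((a.length : Int) + b.length ≤ rb) := by omega
    simp [hmin, hle]
  · have h1 := pvRank_some_bound a x ra ha
    have hle : ra ≤ (a.length : Int) + b.length := by omega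
    simp [hle]
  · simp only [Option.getD_some]
    rcases le_or_gt ra rb with h | h
    · rw [if_pos h, min_eq_left h, if_pos h]
    · rw [if_neg (by omega), min_eq_right (by omega), if_neg (by omega)]

-- insertBy walks past every element it is not ordered before
theorem pv_insertBy_append_not (before : Int → Int → Bool) (x : Int) (l r : List Int)
    (h : ∀ y ∈ l, before x y = false) :
    PySem.List.insertBy before x (l ++ r) = l ++ PySem.List.insertBy before x r := by
  induction l with
  | nil => rfl
  | cons y l ih =>
    simp only [List.cons_append, PySem.List.insertBy]
    rw [h y List.mem_cons_self]
    simp only [Bool.false_eq_true, if_false, List.cons.injEq, true_and]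
    exact ih (fun z hz => h z (List.mem_cons_of_mem _ hz))

theorem pv_insertBy_all_before (before : Int → Int → Bool) (x : Int) (ys : List Int)
    (h : ∀ y ∈ ys, before x y = true) :
    PySem.List.insertBy before x ys = x :: ys := by
  cases ys with
  | nil => rfl
  | cons y ys => simp [PySem.List.insertBy, h y List.mem_cons_self]

-- inserting x into ascending key buckets appends it to the bucket of its key
theorem pv_ins_buckets (key : Int → Int) (x : Int) :
    ∀ (n a : Nat) (pref : List Int), (a : Int) ≤ key x → key x < (a : Int) + n →
      PySem.List.insertBy (fun p q => decide (key p < key q)) x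
          (((List.range' a n).map (fun (k : Nat) => pref.filter (fun y => key y = (k : Int)))).flatten)
        = ((List.range' a n).map (fun (k : Nat) => (pref ++ [x]).filter (fun y => key y = (k : Int)))).flatten := by
  intro n
  induction n with
  | zero => intro a pref h1 h2; omega
  | succ n ih =>
    intro a pref h1 h2
    rw [List.range'_succ, List.map_cons, List.map_cons, List.flatten_cons, List.flatten_cons]
    have hmemtail : ∀ y ∈ ((List.range' (a+1) n).map
        (fun (k : Nat) => pref.filter (fun y => key y = (k : Int)))).flatten, (a : Int) < key y := by
      intro y hy
      rw [List.mem_flatten] at hy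
      obtain ⟨c, hc, hyc⟩ := hy
      rw [List.mem_map] at hc
      obtain ⟨k, hk, rfl⟩ := hc
      have hk' := List.mem_range'_1.mp hk
      have := (List.mem_filter.mp hyc).2
      simp only [decide_eq_true_eq] at this
      omega
    by_cases hkey : key x = (a : Int)
    · rw [pv_insertBy_append_not _ _ _ _
        (fun y hy => by
          have := (List.mem_filter.mp hy).2
          simp only [decide_eq_true_eq] at this
          simp [hkey, this]),
        pv_insertBy_all_before _ _ _
        (fun y hy => by simp only [decide_eq_true_eq]; rw [hkey]; exact hmemtail y hy)]
      have htail : ∀ k ∈ List.range' (a+1) n,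
          (pref ++ [x]).filter (fun y => key y = (k : Int)) = pref.filter (fun y => key y = (k : Int)) := by
        intro k hk
        have hk' := List.mem_range'_1.mp hk
        rw [List.filter_append]
        simp only [List.filter_cons, List.filter_nil]
        rw [if_neg (by simp only [decide_eq_true_eq]; omega), List.append_nil]
      rw [show List.map (fun (k : Nat) => (pref ++ [x]).filter (fun y => key y = (k : Int)))
            (List.range' (a+1) n)
          = List.map (fun (k : Nat) => pref.filter (fun y => key y = (k : Int)))
            (List.range' (a+1) n) from List.map_congr_left htail]
      rw [show (pref ++ [x]).filter (fun y => decide (key y = (a : Int)))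
          = pref.filter (fun y => decide (key y = (a : Int))) ++ [x] by
        rw [List.filter_append]
        simp [hkey]]
      simp
    · rw [pv_insertBy_append_not _ _ _ _
        (fun y hy => by
          have := (List.mem_filter.mp hy).2
          simp only [decide_eq_true_eq] at this
          simp only [decide_eq_false_iff_not]
          omega)]
      rw [ih (a+1) pref (by omega) (by push_cast; omega)]
      have : (pref ++ [x]).filter (fun y => key y = (a : Int)) = pref.filter (fun y => key y = (a : Int)) := by
        rw [List.filter_append]
        simp only [List.filter_cons, List.filter_nil]
        rw [if_neg (by simp only [decide_eq_true_eq]; omega), List.append_nil]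
      rw [this]

-- Python's stable sort by an Int key with values in [0, n) is the ascending
-- concatenation of the key buckets, each kept in input order
theorem pv_sorted_buckets (key : Int → Int) (n : Nat) (xs : List Int)
    (h : ∀ x ∈ xs, 0 ≤ key x ∧ key x < (n : Int)) :
    PySem.List.sorted xs key false
      = ((List.range n).map (fun (k : Nat) => xs.filter (fun y => key y = (k : Int)))).flatten := by
  rw [PySem.List.sorted_eq_foldl_insertBy, List.range_eq_range']
  suffices haux : ∀ (l pref : List Int), (∀ x ∈ l, 0 ≤ key x ∧ key x < (n : Int)) →
      l.foldl (fun acc x => PySem.List.insertBy (fun p q => decide (key p < key q)) x acc)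
        (((List.range' 0 n).map (fun (k : Nat) => pref.filter (fun y => key y = (k : Int)))).flatten)
      = ((List.range' 0 n).map (fun (k : Nat) => (pref ++ l).filter (fun y => key y = (k : Int)))).flatten by
    have := haux xs [] h
    simpa using this
  intro l
  induction l with
  | nil => intro pref _; simp
  | cons x l ih =>
    intro pref hl
    rw [List.foldl_cons,
      pv_ins_buckets key x n 0 pref (by simpa using (hl x List.mem_cons_self).1)
        (by simpa using (hl x List.mem_cons_self).2),
      ih (pref ++ [x]) (fun y hy => hl y (List.mem_cons_of_mem _ hy))]
    simp

-- A's output loop over a duplicate-free list never skips: it copies the list and maps the team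
theorem pv_foldl_seen (team : Int → Int) :
    ∀ (l : List Int) (acc1 acc2 : List Int) (s : PySem.Set Int),
      l.Nodup → (∀ x ∈ l, x ∉ s) →
      ∃ s', l.foldl
          (fun (st : List Int × List Int × PySem.Set Int) item =>
            if PySem.Set.contains st.2.2 item then st
            else (st.1 ++ [item], st.2.1 ++ [team item], PySem.Set.add st.2.2 item))
          (acc1, acc2, s)
        = (acc1 ++ l, acc2 ++ l.map team, s') := by
  intro l
  induction l with
  | nil => intro acc1 acc2 s _ _; exact ⟨s, by simp⟩
  | cons x l ih =>
    intro acc1 acc2 s hnd hs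
    rw [List.foldl_cons]
    have hc : PySem.Set.contains s x = false := by
      rw [← Bool.not_eq_true, PySem.Set.contains_iff]
      exact hs x List.mem_cons_self
    rw [hc]
    simp only [Bool.false_eq_true, if_false]
    obtain ⟨s', hs'⟩ := ih (acc1 ++ [x]) (acc2 ++ [team x]) (PySem.Set.add s x)
      (List.Nodup.of_cons hnd)
      (fun y hy => by
        rw [PySem.Set.mem_add]
        rintro (h | rfl)
        · exact hs y (List.mem_cons_of_mem _ hy) h
        · exact (List.nodup_cons.mp hnd).1 hy)
    refine ⟨s', ?_⟩
    rw [hs']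
    simp

-- B's bucket fold, normalized: bucket j collects the items of key j, in input order
theorem pv_foldl_buckets (key : Int → Int) (g : Int → Int × Int) :
    ∀ (l : List Int) (bs : List (List (Int × Int))),
      (∀ x ∈ l, 0 ≤ key x ∧ key x < (bs.length : Int)) →
      l.foldl (fun bs x =>
          PySem.List.pySetD bs (key x) (PySem.List.pyGetD bs (key x) [] ++ [g x])) bs
        = (List.range bs.length).map
            (fun (j : Nat) => bs.getD j [] ++ (l.filter (fun x => key x = (j : Int))).map g) := by
  intro l
  induction l with
  | nil =>
    intro bs _
    simp only [List.foldl_nil, List.filter_nil, List.map_nil, List.append_nil]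
    refine (List.ext_getElem (by simp) ?_).symm
    intro i h1 h2
    simp only [List.getElem_map, List.getElem_range]
    rw [List.getD_eq_getElem]
  | cons x l ih =>
    intro bs h
    have hx := h x List.mem_cons_self
    have hk : (key x).toNat < bs.length := by omega
    have hstep : PySem.List.pySetD bs (key x) (PySem.List.pyGetD bs (key x) [] ++ [g x])
        = bs.set (key x).toNat (bs.getD (key x).toNat [] ++ [g x]) := by
      rw [PySem.List.pySetD_of_nonneg _ _ hx.1,
        PySem.List.pyGetD_eq_getElem _ _ hx.1 (by simpa using hx.2),
        List.getD_eq_getElem _ _ hk]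
    rw [List.foldl_cons, hstep, ih _ (by
      intro y hy
      have := h y (List.mem_cons_of_mem _ hy)
      simpa using this)]
    simp only [List.length_set]
    apply List.map_congr_left
    intro j hj
    have hjn : j < bs.length := List.mem_range.mp hj
    have hset : (bs.set (key x).toNat (bs.getD (key x).toNat [] ++ [g x])).getD j []
        = if (key x).toNat = j then bs.getD (key x).toNat [] ++ [g x] else bs.getD j [] := by
      rw [List.getD_eq_getElem _ _ (by simpa using hjn), List.getElem_set]
      split_ifs with he
      · rfl
      · rw [List.getD_eq_getElem _ _ hjn]
    rw [hset, List.filter_cons]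
    by_cases he : (key x).toNat = j
    · rw [if_pos he, if_pos (by simp only [decide_eq_true_eq]; omega), he]
      simp
    · rw [if_neg he, if_neg (by simp only [decide_eq_true_eq]; omega)]

-- the two ports agree on every input
theorem pv_main (a b : List Int) :
    balanced_interleave_py a b = balanced_interleave_py_alt a b := by
  have hbound : ∀ x ∈ PySem.List.dedup (a ++ b),
      0 ≤ pvKey a b x ∧ pvKey a b x < ((max a.length b.length : Nat) : Int) :=
    fun x hx => pvKey_bound a b x ((PySem.List.mem_dedup _ _).mp hx)
  -- A's side: the seen-loop copies the sorted, duplicate-free item list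
  have hnd : (PySem.List.sorted (PySem.List.dedup (a ++ b)) (pvKey a b) false).Nodup :=
    (PySem.List.sorted_perm _ _ _).symm.nodup (PySem.List.nodup_dedup _)
  obtain ⟨s', hs'⟩ := pv_foldl_seen (pvTeam a b)
    (PySem.List.sorted (PySem.List.dedup (a ++ b)) (pvKey a b) false) [] [] PySem.Set.empty
    hnd (by intro x _; simp [PySem.Set.empty])
  have hA : balanced_interleave_py a b
      = (PySem.List.sorted (PySem.List.dedup (a ++ b)) (pvKey a b) false,
         (PySem.List.sorted (PySem.List.dedup (a ++ b)) (pvKey a b) false).map (pvTeam a b)) := by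
    show (((PySem.List.sorted (PySem.List.dedup (a ++ b)) (pvKey a b) false).foldl
        (fun (st : List Int × List Int × PySem.Set Int) item =>
          if PySem.Set.contains st.2.2 item then st
          else (st.1 ++ [item], st.2.1 ++ [pvTeam a b item], PySem.Set.add st.2.2 item))
        ([], [], PySem.Set.empty)).1,
       ((PySem.List.sorted (PySem.List.dedup (a ++ b)) (pvKey a b) false).foldl
        (fun (st : List Int × List Int × PySem.Set Int) item =>
          if PySem.Set.contains st.2.2 item then st
          else (st.1 ++ [item], st.2.1 ++ [pvTeam a b item], PySem.Set.add st.2.2 item))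
        ([], [], PySem.Set.empty)).2.1) = _
    rw [hs']
    simp
  -- B's side: the match-step is the normalized bucket step, then the bucket invariant
  have hstep : (PySem.List.dedup (a ++ b)).foldl
      (fun bs item =>
        match (pvRank a).get? item, (pvRank b).get? item with
        | ra, none =>
            PySem.List.pySetD bs (ra.getD 0) (PySem.List.pyGetD bs (ra.getD 0) [] ++ [(item, (0 : Int))])
        | some ra, some rb =>
            if ra ≤ rb then
              PySem.List.pySetD bs ra (PySem.List.pyGetD bs ra [] ++ [(item, (0 : Int))])
            else
              PySem.List.pySetD bs rb (PySem.List.pyGetD bs rb [] ++ [(item, (1 : Int))])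
        | none, some rb =>
            PySem.List.pySetD bs rb (PySem.List.pyGetD bs rb [] ++ [(item, (1 : Int))]))
      (List.replicate (max a.length b.length) ([] : List (Int × Int)))
      = (PySem.List.dedup (a ++ b)).foldl
        (fun bs x => PySem.List.pySetD bs (pvKey a b x)
          (PySem.List.pyGetD bs (pvKey a b x) [] ++ [(x, pvTeam a b x)]))
        (List.replicate (max a.length b.length) ([] : List (Int × Int))) :=
    PySem.List.foldl_congr_mem _ _ _ _
      (fun bs x hx => pv_step_eq a b x bs ((PySem.List.mem_dedup _ _).mp hx))
  have hbuck := pv_foldl_buckets (pvKey a b) (fun x => (x, pvTeam a b x))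
    (PySem.List.dedup (a ++ b))
    (List.replicate (max a.length b.length) ([] : List (Int × Int)))
    (by simpa using hbound)
  have hB : balanced_interleave_py_alt a b
      = ((((List.range (max a.length b.length)).map
            (fun (j : Nat) => ((PySem.List.dedup (a ++ b)).filter
              (fun x => pvKey a b x = (j : Int))).map (fun x => (x, pvTeam a b x)))).flatten).map Prod.fst,
         ((((List.range (max a.length b.length)).map
            (fun (j : Nat) => ((PySem.List.dedup (a ++ b)).filter
              (fun x => pvKey a b x = (j : Int))).map (fun x => (x, pvTeam a b x)))).flatten).map Prod.snd)) := by
    show (((PySem.List.dedup (a ++ b)).foldl _ (List.replicate (max a.length b.length) ([] : List (Int × Int)))).flatten.map Prod.fst,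
          ((PySem.List.dedup (a ++ b)).foldl _ (List.replicate (max a.length b.length) ([] : List (Int × Int)))).flatten.map Prod.snd) = _
    rw [hstep, hbuck]
    simp
  rw [hA, hB,
    pv_sorted_buckets (pvKey a b) (max a.length b.length) (PySem.List.dedup (a ++ b)) hbound]
  simp only [Prod.mk.injEq]
  constructor <;>
    simp [List.map_flatten, List.map_map, Function.comp_def]

-- ===== VERDICT (by name: the statement is the Claim_ definition above) =====
theorem balanced_interleave_py_spec : Claim_equal_balanced_interleave_py := by
  intro ranking_a ranking_b _
  unfold Spec_balanced_interleave_py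
  exact pv_main ranking_a ranking_b
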